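-- pv_equiv track=rewrite | github.com/Ahmad-Mdadeh/IR | app/Services.py | remove_phonetic_notation
-- ===== SOURCE A (Python) =====
-- def remove_phonetic_notation(text):
--     cleaned_text = ""
--     in_phonetic_notation = False
--
--     for char in text:
--         if char == '/':
--             in_phonetic_notation = not in_phonetic_notation
--         elif not in_phonetic_notation:
--             cleaned_text += char
--     return cleaned_text
-- ===== SOURCE B (Python) =====
-- def remove_phonetic_notation(text):
--     out = []
--     for i, part in enumerate(text.split('/')):
--         if i % 2 == 0:
--             out.append(part)
--     return ''.join(out)
-- ===== Notes on version B (the rewrite author's own statement) =====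
-- stated objective: faster
-- what changed: Replaces the character-by-character in/out-flag toggle with one split on the slash separator followed by joining the even-indexed segments (the parts outside phonetic notation).
import Mathlib
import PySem

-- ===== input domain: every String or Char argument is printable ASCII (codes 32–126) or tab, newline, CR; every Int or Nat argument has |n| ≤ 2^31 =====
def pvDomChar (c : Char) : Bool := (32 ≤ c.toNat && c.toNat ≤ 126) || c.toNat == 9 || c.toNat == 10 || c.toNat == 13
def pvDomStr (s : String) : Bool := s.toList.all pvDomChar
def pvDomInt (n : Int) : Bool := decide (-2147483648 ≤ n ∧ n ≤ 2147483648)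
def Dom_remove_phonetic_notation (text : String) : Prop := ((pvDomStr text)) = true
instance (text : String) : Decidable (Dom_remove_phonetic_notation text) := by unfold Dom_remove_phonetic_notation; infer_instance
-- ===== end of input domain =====

-- B replaces A's char-by-char in/out-flag toggle with one split on the slash separator and a join of the even-indexed segments (measured faster at the check's largest size).


-- ===== PORT A =====
-- char loop with an in_phonetic_notation flag; cleaned_text accumulated as a char list, turned into a String at the end
def remove_phonetic_notation (text : String) : String :=
  let st := text.toList.foldl
    (fun (st : List Char × Bool) c =>
      if c = '/' then (st.1, !st.2)
      else if !st.2 then (st.1 ++ [c], st.2)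
      else st)
    ([], false)
  String.ofList st.1

-- ===== PORT B =====
-- text.split('/'), keep parts of even index, ''.join (= flatten)
def remove_phonetic_notation_alt (text : String) : String :=
  let parts := text.toList.splitOn '/'
  let out := ((PySem.List.enumerate parts).filter (fun p => p.1 % 2 == 0)).map (·.2)
  String.ofList out.flatten

-- ===== PRECONDITION & SPEC =====
def Spec_remove_phonetic_notation (text : String) (out : String) : Prop := out = remove_phonetic_notation_alt text
instance (text : String) (out : String) : Decidable (Spec_remove_phonetic_notation text out) := by unfold Spec_remove_phonetic_notation; infer_instance

-- ===== CLAIM (what is proved, stated in full; the proofs are below) =====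
def Claim_equal_remove_phonetic_notation : Prop := ∀ (text : String), Dom_remove_phonetic_notation text → Spec_remove_phonetic_notation text (remove_phonetic_notation text)

-- ===== LEMMAS AND PROOFS =====

-- chars A keeps starting from a given flag state
def pvKeep (flag : Bool) : List Char → List Char
  | [] => []
  | c :: r => if c = '/' then pvKeep (!flag) r else if flag then pvKeep flag r else c :: pvKeep flag r

-- flatten of the even-indexed (odd = false) / odd-indexed (odd = true) parts
def pvEJ (odd : Bool) : List (List Char) → List Char
  | [] => []
  | x :: r => (if odd then [] else x) ++ pvEJ (!odd) r

theorem pvFoldl_keep (cs : List Char) (acc : List Char) (flag : Bool) :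
    (cs.foldl
      (fun (st : List Char × Bool) c =>
        if c = '/' then (st.1, !st.2)
        else if !st.2 then (st.1 ++ [c], st.2)
        else st)
      (acc, flag)).1 = acc ++ pvKeep flag cs := by
  induction cs generalizing acc flag with
  | nil => simp [pvKeep]
  | cons c r ih =>
    rw [List.foldl_cons]
    by_cases hc : c = '/'
    · rw [if_pos hc, ih]
      simp [pvKeep, hc]
    · rw [if_neg hc]
      cases flag with
      | false =>
        simp only [Bool.not_false, ih, pvKeep, hc, ite_false]
        simp [List.append_assoc]
      | true =>
        simp only [Bool.not_true, Bool.false_eq_true, ite_false, ih, pvKeep, hc]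
        simp

theorem pvKeep_splitOnP (cs : List Char) (flag : Bool) :
    pvKeep flag cs = pvEJ flag (cs.splitOnP (· == '/')) := by
  induction cs generalizing flag with
  | nil => simp [pvKeep, List.splitOnP_nil, pvEJ]
  | cons c r ih =>
    by_cases hc : c = '/'
    · simp [pvKeep, hc, List.splitOnP_cons, pvEJ, ih]
    · obtain ⟨h, t, hsp⟩ : ∃ h t, r.splitOnP (· == '/') = h :: t := by
        rcases e : r.splitOnP (· == '/') with _ | ⟨h, t⟩
        · exact absurd e (List.splitOnP_ne_nil _ r)
        · exact ⟨h, t, rfl⟩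
      cases flag with
      | false => simp [pvKeep, hc, List.splitOnP_cons, hsp, pvEJ, ih, List.modifyHead]
      | true => simp [pvKeep, hc, List.splitOnP_cons, hsp, pvEJ, ih, List.modifyHead]

theorem pvEnum_even (parts : List (List Char)) (n : Int) :
    (((PySem.List.enumerate parts n).filter (fun p => p.1 % 2 == 0)).map (·.2)).flatten
      = pvEJ (!(n % 2 == 0)) parts := by
  induction parts generalizing n with
  | nil => simp [PySem.List.enumerate, pvEJ]
  | cons x r ih =>
    have hpar : ((n + 1) % 2 == 0) = !(n % 2 == 0) := by
      by_cases h : n % 2 = 0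
      · have h1 : (n + 1) % 2 = 1 := by omega
        simp [h, h1]
      · have h1 : (n + 1) % 2 = 0 := by omega
        simp [h, h1]
    by_cases hn : n % 2 = 0
    · simp [PySem.List.enumerate, pvEJ, ih, hn, hpar]
    · simp [PySem.List.enumerate, pvEJ, ih, hn, hpar]

-- ===== VERDICT (by name: the statement is the Claim_ definition above) =====
theorem remove_phonetic_notation_spec : Claim_equal_remove_phonetic_notation := by
  intro text _
  unfold Spec_remove_phonetic_notation remove_phonetic_notation remove_phonetic_notation_alt
  simp only [pvFoldl_keep, List.nil_append, pvEnum_even, List.splitOn]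
  rw [pvKeep_splitOnP]
  norm_num
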